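-- pv_equiv track=rewrite | github.com/DarrenZal/salish-sea-dreaming | briony-lora/convert_lora_format.py | _underscore_to_dot
-- ===== SOURCE A (Python) =====
-- def _underscore_to_dot(path):
--     """
--     Convert kohya underscore-separated path to dot-separated.
--     Handles tricky cases like to_q, to_k, to_v, to_out, proj_in, proj_out, ff_net.
--     """
--     # Known compound names that should keep underscores
--     compounds = {
--         "to_q", "to_k", "to_v", "to_out", "proj_in", "proj_out",
--         "ff_net", "group_norm", "conv_shortcut", "conv_in", "conv_out",
--         "time_emb_proj", "linear_1", "linear_2",
--     }
--
--     parts = path.split("_")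
--     result = []
--     i = 0
--
--     while i < len(parts):
--         # Check for compound names (2-word)
--         if i + 1 < len(parts):
--             two_word = f"{parts[i]}_{parts[i+1]}"
--             if two_word in compounds:
--                 result.append(two_word)
--                 i += 2
--                 continue
--
--         # Check if this part is a number (layer index → use dot separator)
--         if parts[i].isdigit():
--             result.append(parts[i])
--             i += 1
--             continue
--
--         # Regular module name
--         result.append(parts[i])
--         i += 1
--
--     return ".".join(result)
-- ===== SOURCE B (Python) =====
-- def _underscore_to_dot(path):
--     """
--     Convert kohya underscore-separated path to dot-separated, keeping known
--     compound names intact.  One pass over adjacent token pairs: each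
--     underscore "gap" is kept iff the two tokens around it form a known
--     compound and the previous gap was not kept.
--     """
--     # Only the 2-word compounds: a gap joins exactly two tokens, so a
--     # 3-word name like time_emb_proj can never match a single gap.
--     compounds = {
--         "to_q", "to_k", "to_v", "to_out", "proj_in", "proj_out",
--         "ff_net", "group_norm", "conv_shortcut", "conv_in", "conv_out",
--         "linear_1", "linear_2",
--     }
--     parts = path.split("_")
--     out = parts[0]
--     prev_kept = False
--     for a, b in zip(parts, parts[1:]):
--         kept = (not prev_kept) and (a + "_" + b) in compounds
--         out += ("_" if kept else ".") + b
--         prev_kept = kept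
--     return out
-- ===== Notes on version B (the rewrite author's own statement) =====
-- stated objective: simpler
-- what changed: A walks the token list with an index automaton that consumes two tokens on a compound match and one otherwise; B makes a single pairwise pass over zip(parts, parts[1:]) deciding per underscore gap (kept iff the adjacent tokens form a 2-word compound and the previous gap was not kept), with the never-matchable 3-word entry and the no-op isdigit branch dropped.
import Mathlib
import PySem

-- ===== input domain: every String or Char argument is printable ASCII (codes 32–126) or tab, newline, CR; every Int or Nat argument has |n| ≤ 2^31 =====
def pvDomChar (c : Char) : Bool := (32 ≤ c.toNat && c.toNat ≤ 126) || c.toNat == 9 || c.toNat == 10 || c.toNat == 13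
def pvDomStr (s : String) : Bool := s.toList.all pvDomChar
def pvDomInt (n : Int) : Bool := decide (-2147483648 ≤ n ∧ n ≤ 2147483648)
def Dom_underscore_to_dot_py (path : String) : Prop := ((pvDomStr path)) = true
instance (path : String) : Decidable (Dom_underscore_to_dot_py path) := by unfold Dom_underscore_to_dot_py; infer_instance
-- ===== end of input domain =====

-- B replaces A's index automaton over the split tokens (consume two tokens on a
-- compound match, else one) by a single pairwise pass that decides for each
-- underscore gap whether it is kept; objective: simpler.

-- ===== PORT A =====
-- Python set literal `compounds` (all elements distinct, so list membership = set membership)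
def uA_compounds : List String :=
  ["to_q", "to_k", "to_v", "to_out", "proj_in", "proj_out",
   "ff_net", "group_norm", "conv_shortcut", "conv_in", "conv_out",
   "time_emb_proj", "linear_1", "linear_2"]

-- path.split("_") with the nonempty literal separator "_": exact via PySem.Chars.splitOn
def uSplit (path : String) : List String :=
  (PySem.Chars.splitOn path.toList ['_']).map String.ofList

-- the while loop of A: i the index, result the accumulator (f"{parts[i]}_{parts[i+1]}"
-- written inline instead of the local binding `two_word`)
def uA_loop (parts : List String) (i : Nat) (result : List String) : List String :=
  if h : i < parts.length then
    if h2 : i + 1 < parts.length then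
      if uA_compounds.contains (parts[i] ++ "_" ++ parts[i+1]) then
        uA_loop parts (i+2) (result ++ [parts[i] ++ "_" ++ parts[i+1]])
      else if PySem.Str.strIsdigit parts[i] then
        uA_loop parts (i+1) (result ++ [parts[i]])
      else
        uA_loop parts (i+1) (result ++ [parts[i]])
    else if PySem.Str.strIsdigit parts[i] then
      uA_loop parts (i+1) (result ++ [parts[i]])
    else
      uA_loop parts (i+1) (result ++ [parts[i]])
  else result
termination_by parts.length - i

def underscore_to_dot_py (path : String) : String :=
  PySem.Str.join "." (uA_loop (uSplit path) 0 [])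

-- ===== PORT B =====
-- only the 2-word compounds (a gap joins exactly two tokens)
def uB_compounds : List String :=
  ["to_q", "to_k", "to_v", "to_out", "proj_in", "proj_out",
   "ff_net", "group_norm", "conv_shortcut", "conv_in", "conv_out",
   "linear_1", "linear_2"]

-- B: fold over zip(parts, parts[1:]) with state (out, prev_kept);
-- parts[0] ported as headD "" (split("_") never returns an empty list)
def underscore_to_dot_py_alt (path : String) : String :=
  let parts := uSplit path
  (((parts.zip parts.tail).foldl
    (fun (st : String × Bool) ab =>
      let kept := (!st.2) && uB_compounds.contains (ab.1 ++ "_" ++ ab.2)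
      (st.1 ++ (if kept then "_" else ".") ++ ab.2, kept))
    (parts.headD "", false))).1

-- ===== PRECONDITION & SPEC =====
def Spec_underscore_to_dot_py (path : String) (out : String) : Prop := out = underscore_to_dot_py_alt path
instance (path : String) (out : String) : Decidable (Spec_underscore_to_dot_py path out) := by unfold Spec_underscore_to_dot_py; infer_instance

-- ===== CLAIM (what is proved, stated in full; the proofs are below) =====
def Claim_equal_underscore_to_dot_py : Prop := ∀ (path : String), Dom_underscore_to_dot_py path → Spec_underscore_to_dot_py path (underscore_to_dot_py path)

-- ===== LEMMAS AND PROOFS =====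

-- canonical result list: greedy 2-word compound grouping of the tokens
def canonL : List String → List String
  | [] => []
  | [a] => [a]
  | a :: b :: r =>
    if uB_compounds.contains (a ++ "_" ++ b) then (a ++ "_" ++ b) :: canonL r
    else a :: canonL (b :: r)

-- interleaved separators+tokens produced by B after the head token
def uT : Bool → List String → String
  | _, [] => ""
  | _, [_] => ""
  | prev, a :: b :: r =>
    ((if (!prev) && uB_compounds.contains (a ++ "_" ++ b) then "_" else ".") ++ b)
      ++ uT ((!prev) && uB_compounds.contains (a ++ "_" ++ b)) (b :: r)

lemma sjoin_nil : PySem.Str.join "." ([] : List String) = "" := by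
  apply String.toList_inj.mp
  simp [PySem.Str.join, PySem.Chars.join_nil]

lemma sjoin_singleton (a : String) : PySem.Str.join "." [a] = a := by
  apply String.toList_inj.mp
  simp [PySem.Str.join, PySem.Chars.join_singleton]

lemma sjoin_cons (a : String) (l : List String) (h : l ≠ []) :
    PySem.Str.join "." (a :: l) = a ++ "." ++ PySem.Str.join "." l := by
  cases l with
  | nil => exact absurd rfl h
  | cons b r =>
    apply String.toList_inj.mp
    simp [PySem.Str.join, PySem.Chars.join_cons_cons]

lemma canonL_ne_nil (a : String) (l : List String) : canonL (a :: l) ≠ [] := by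
  cases l with
  | nil => simp [canonL]
  | cons b r => simp only [canonL]; split <;> simp

-- tokens of path.split("_") contain no '_'
lemma go_noU : ∀ (fuel : Nat) (l cur : List Char) (acc : List (List Char)),
    l.length < fuel → '_' ∉ cur → (∀ t ∈ acc, '_' ∉ t) →
    ∀ t ∈ PySem.Chars.splitOn.go ['_'] fuel l cur acc, '_' ∉ t := by
  intro fuel
  induction fuel with
  | zero => intro l cur acc hf; omega
  | succ n ih =>
    intro l cur acc hf hc ha t ht
    cases l with
    | nil =>
      simp only [PySem.Chars.splitOn.go, List.mem_reverse, List.mem_cons] at ht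
      rcases ht with h | h
      · subst h; simpa using hc
      · exact ha _ h
    | cons c rest =>
      rw [PySem.Chars.splitOn.go] at ht
      by_cases hcu : c = '_'
      · rw [if_pos (by simp [List.isPrefixOf, hcu])] at ht
        refine ih _ [] _ (by simp at hf ⊢; omega) (by simp) ?_ t (by simpa using ht)
        intro u hu
        rcases List.mem_cons.mp hu with h | h
        · subst h; simpa using hc
        · exact ha _ h
      · rw [if_neg (by simp [List.isPrefixOf]; exact fun h => hcu h.symm)] at ht
        refine ih rest (c :: cur) acc (by simp at hf ⊢; omega) ?_ ha t ht
        intro h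
        rcases List.mem_cons.mp h with h | h
        · exact hcu h.symm
        · exact hc h

lemma split_noU (path : String) : ∀ t ∈ uSplit path, '_' ∉ t.toList := by
  intro t ht
  simp only [uSplit, List.mem_map] at ht
  obtain ⟨x, hx, rfl⟩ := ht
  have hgo := go_noU (path.toList.length + 1) path.toList [] [] (by omega) (by simp)
    (by simp) x (by simpa [PySem.Chars.splitOn] using hx)
  simpa using hgo

-- a_b with underscore-free a, b is never the 3-word name, so the two compound sets agree
lemma containsA_eq (a b : String) (ha : '_' ∉ a.toList) (hb : '_' ∉ b.toList) :
    uA_compounds.contains (a ++ "_" ++ b) = uB_compounds.contains (a ++ "_" ++ b) := by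
  have hne : a ++ "_" ++ b ≠ "time_emb_proj" := by
    intro h
    have hcount := congrArg (fun s => s.toList.count '_') h
    simp only [String.toList_append] at hcount
    rw [List.count_append, List.count_append] at hcount
    rw [List.count_eq_zero.mpr ha, List.count_eq_zero.mpr hb] at hcount
    simp at hcount
  have hmem : (a ++ "_" ++ b) ∈ uA_compounds ↔ (a ++ "_" ++ b) ∈ uB_compounds := by
    simp only [uA_compounds, uB_compounds, List.mem_cons, List.not_mem_nil, or_false]
    tauto
  rw [Bool.eq_iff_iff]
  simpa using hmem

lemma A_loop_canon (parts : List String) (hnu : ∀ t ∈ parts, '_' ∉ t.toList) :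
    ∀ (k i : Nat) (result : List String), parts.length - i ≤ k →
      uA_loop parts i result = result ++ canonL (parts.drop i) := by
  intro k
  induction k with
  | zero =>
    intro i result hk
    rw [uA_loop, dif_neg (by omega)]
    simp [List.drop_eq_nil_of_le (by omega : parts.length ≤ i), canonL]
  | succ n ih =>
    intro i result hk
    by_cases h : i < parts.length
    · rw [uA_loop, dif_pos h]
      by_cases h2 : i + 1 < parts.length
      · rw [dif_pos h2]
        have hdrop : parts.drop i = parts[i] :: parts[i+1] :: parts.drop (i+2) := by
          rw [List.drop_eq_getElem_cons h, List.drop_eq_getElem_cons h2]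
        have hcc : uA_compounds.contains (parts[i] ++ "_" ++ parts[i+1]) =
            uB_compounds.contains (parts[i] ++ "_" ++ parts[i+1]) :=
          containsA_eq _ _ (hnu _ (List.getElem_mem _)) (hnu _ (List.getElem_mem _))
        rw [hcc]
        by_cases hcb : uB_compounds.contains (parts[i] ++ "_" ++ parts[i+1]) = true
        · have hm : (parts[i] ++ "_" ++ parts[i+1]) ∈ uB_compounds := by simpa using hcb
          rw [if_pos hcb, ih (i+2) _ (by omega), hdrop]
          simp [canonL, hm]
        · have hm : (parts[i] ++ "_" ++ parts[i+1]) ∉ uB_compounds := by simpa using hcb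
          rw [if_neg hcb]
          have hdrop1 : parts.drop (i+1) = parts[i+1] :: parts.drop (i+2) :=
            List.drop_eq_getElem_cons h2
          split
          · rw [ih (i+1) _ (by omega), hdrop, hdrop1]
            simp [canonL, hm]
          · rw [ih (i+1) _ (by omega), hdrop, hdrop1]
            simp [canonL, hm]
      · rw [dif_neg h2]
        have hdrop : parts.drop i = [parts[i]] := by
          rw [List.drop_eq_getElem_cons h,
            List.drop_eq_nil_of_le (by omega : parts.length ≤ i + 1)]
        split
        · rw [ih (i+1) _ (by omega), hdrop,
            List.drop_eq_nil_of_le (by omega : parts.length ≤ i + 1)]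
          simp [canonL]
        · rw [ih (i+1) _ (by omega), hdrop,
            List.drop_eq_nil_of_le (by omega : parts.length ≤ i + 1)]
          simp [canonL]
    · rw [uA_loop, dif_neg h]
      simp [List.drop_eq_nil_of_le (by omega : parts.length ≤ i), canonL]

lemma fold_uT (l : List String) : ∀ (out : String) (prev : Bool),
    ((l.zip l.tail).foldl
      (fun (st : String × Bool) ab =>
        (st.1 ++ (if (!st.2) && uB_compounds.contains (ab.1 ++ "_" ++ ab.2) then "_" else ".")
           ++ ab.2, (!st.2) && uB_compounds.contains (ab.1 ++ "_" ++ ab.2)))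
      (out, prev)).1 = out ++ uT prev l := by
  induction l with
  | nil => intro out prev; simp [uT]
  | cons a xs ih =>
    cases xs with
    | nil => intro out prev; simp [uT]
    | cons b r =>
      intro out prev
      simp only [List.tail_cons, List.zip_cons_cons, List.foldl_cons]
      simp only [List.tail_cons] at ih
      rw [ih]
      simp [uT, String.append_assoc]

lemma uT_join : ∀ (n : Nat) (l : List String), l.length ≤ n →
    (∀ a : String, a ++ uT false (a :: l) = PySem.Str.join "." (canonL (a :: l))) ∧
    (∀ x : String, uT true (x :: l) =
      if l = [] then "" else "." ++ PySem.Str.join "." (canonL l)) := by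
  intro n
  induction n with
  | zero =>
    intro l hl
    have : l = [] := List.eq_nil_of_length_eq_zero (by omega)
    subst this
    exact ⟨fun a => by simp [uT, canonL, sjoin_singleton], fun x => by simp [uT]⟩
  | succ n ih =>
    intro l hl
    cases l with
    | nil =>
      exact ⟨fun a => by simp [uT, canonL, sjoin_singleton], fun x => by simp [uT]⟩
    | cons b r =>
      have hr : r.length ≤ n := by simpa using hl
      constructor
      · intro a
        by_cases hc : uB_compounds.contains (a ++ "_" ++ b) = true
        · have hm : (a ++ "_" ++ b) ∈ uB_compounds := by simpa using hc
          cases r with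
          | nil =>
            have hm2 : a ++ ("_" ++ b) ∈ uB_compounds := by rwa [← String.append_assoc]
            have hcan : canonL [a, b] = [a ++ "_" ++ b] := by simp [canonL, hm]
            rw [hcan, sjoin_singleton, uT, uT]
            simp [hm2, String.append_assoc]
          | cons c r' =>
            have hK := (ih (c :: r') hr).2 b
            rw [if_neg (by simp)] at hK
            have hcan : canonL (a :: b :: c :: r') = (a ++ "_" ++ b) :: canonL (c :: r') := by
              simp [canonL, hm]
            rw [hcan, sjoin_cons _ _ (canonL_ne_nil c r'), uT]
            simp only [Bool.not_false, Bool.true_and, hc, if_true, hK]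
            simp [String.append_assoc]
        · have hm : (a ++ "_" ++ b) ∉ uB_compounds := by simpa using hc
          have hH := (ih r hr).1 b
          have hcan : canonL (a :: b :: r) = a :: canonL (b :: r) := by simp [canonL, hm]
          have hm2 : a ++ ("_" ++ b) ∉ uB_compounds := by rwa [← String.append_assoc]
          rw [hcan, sjoin_cons _ _ (canonL_ne_nil b r), ← hH, uT]
          simp [hm2, String.append_assoc]
      · intro x
        have hH := (ih r hr).1 b
        rw [if_neg (by simp), ← hH]
        simp [uT, String.append_assoc]

-- ===== VERDICT (by name: the statement is the Claim_ definition above) =====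
theorem underscore_to_dot_py_spec : Claim_equal_underscore_to_dot_py := by
  intro path _
  unfold Spec_underscore_to_dot_py
  have hnu := split_noU path
  have hA : uA_loop (uSplit path) 0 [] = canonL (uSplit path) := by
    simpa using A_loop_canon (uSplit path) hnu (uSplit path).length 0 [] (by omega)
  have hB : underscore_to_dot_py_alt path = (uSplit path).headD "" ++ uT false (uSplit path) := by
    rw [underscore_to_dot_py_alt]
    exact fold_uT (uSplit path) _ false
  rw [underscore_to_dot_py, hA, hB]
  cases hp : uSplit path with
  | nil => simp [canonL, sjoin_nil, uT]
  | cons a r =>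
    simp only [List.headD_cons]
    exact ((uT_join r.length r le_rfl).1 a).symm
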